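-- pv_equiv track=rewrite | github.com/RJMillerLab/ModelTables | src/data_analysis/get_from.py | _prioritize_candidates
-- ===== SOURCE A (Python) =====
-- from typing import List, Dict, Any, Tuple, Optional
--
-- def _prioritize_candidates(token: str, candidates: List[str]) -> List[str]:
--     token_l = token.lower()
--     # Simple preference rules
--     preferences: List[str] = []
--     if token_l in {"csvs", "csv", "table", "tables"}:
--         preferences = [
--             "hugging_table_list_sym", "github_table_list_sym", "html_table_list_sym", "llm_table_list_sym",
--             "hugging_table_list", "github_table_list", "html_table_list_mapped", "llm_table_list_mapped",
--             "hugging_table_list_dedup", "github_table_list_dedup", "html_table_list_mapped_dedup", "llm_table_list_mapped_dedup",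
--             "csv_path",
--         ]
--     elif token_l in {"readme", "readme_path", "readmepath"}:
--         preferences = ["readme_path"]
--     elif token_l in {"model", "modelid", "model_id"}:
--         preferences = ["modelId"]
--     # Rank candidates by preference order first
--     pref_rank = {name: i for i, name in enumerate(preferences)}
--     def sort_key(name: str) -> Tuple[int, int, str]:
--         return (pref_rank.get(name, 10_000), len(name), name)
--     return sorted(candidates, key=sort_key)
-- ===== SOURCE B (Python) =====
-- from typing import List
--
-- # The twelve csv-family names follow a pattern over four base names, so we
-- # generate them instead of listing all thirteen strings.
-- _BASES = ["hugging_table_list", "github_table_list",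
--           "html_table_list_mapped", "llm_table_list_mapped"]
--
--
-- def _preferences(t: str) -> List[str]:
--     if t in ("csvs", "csv", "table", "tables"):
--         return ([b.replace("_mapped", "") + "_sym" for b in _BASES]
--                 + _BASES
--                 + [b + "_dedup" for b in _BASES]
--                 + ["csv_path"])
--     if t in ("readme", "readme_path", "readmepath"):
--         return ["readme_path"]
--     if t in ("model", "modelid", "model_id"):
--         return ["modelId"]
--     return []
--
--
-- def _prioritize_candidates(token: str, candidates: List[str]) -> List[str]:
--     prefs = _preferences(token.lower())
--     prio = [c for p in prefs for c in candidates if c == p]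
--     rest = sorted((c for c in candidates if c not in prefs),
--                   key=lambda n: (len(n), n))
--     return prio + rest
-- ===== Notes on version B (the rewrite author's own statement) =====
-- stated objective: simpler
-- what changed: Replaces the rank-dict plus composite three-part sort key with a two-phase partition (preference list walked in order collecting matching candidates, only the non-preferred remainder sorted by (len, name)), and generates the twelve patterned csv-family preference names from four base names instead of listing them.
import Mathlib
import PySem

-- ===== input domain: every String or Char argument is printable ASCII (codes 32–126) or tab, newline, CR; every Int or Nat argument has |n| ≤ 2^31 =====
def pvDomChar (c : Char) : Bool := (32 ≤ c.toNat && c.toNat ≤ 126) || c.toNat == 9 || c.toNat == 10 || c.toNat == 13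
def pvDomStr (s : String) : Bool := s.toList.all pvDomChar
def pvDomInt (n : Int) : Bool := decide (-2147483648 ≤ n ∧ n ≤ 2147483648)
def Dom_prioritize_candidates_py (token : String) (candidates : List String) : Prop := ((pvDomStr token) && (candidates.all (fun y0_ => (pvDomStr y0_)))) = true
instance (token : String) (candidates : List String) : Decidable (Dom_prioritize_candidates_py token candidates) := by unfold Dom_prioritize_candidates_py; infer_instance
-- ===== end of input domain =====

-- B replaces A's rank-dict + composite three-part sort key by a partition (preferred
-- candidates collected in preference order, the rest sorted by (len, name)), and
-- generates the patterned csv-family preference names from four base names.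

-- ===== PORT A =====
-- the preference-list selection (the if/elif chain over token.lower())
def pvPrefsA (token_l : String) : List String :=
  if token_l ∈ ["csvs", "csv", "table", "tables"] then
    ["hugging_table_list_sym", "github_table_list_sym", "html_table_list_sym", "llm_table_list_sym",
     "hugging_table_list", "github_table_list", "html_table_list_mapped", "llm_table_list_mapped",
     "hugging_table_list_dedup", "github_table_list_dedup", "html_table_list_mapped_dedup", "llm_table_list_mapped_dedup",
     "csv_path"]
  else if token_l ∈ ["readme", "readme_path", "readmepath"] then ["readme_path"]
  else if token_l ∈ ["model", "modelid", "model_id"] then ["modelId"]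
  else []

def prioritize_candidates_py (token : String) (candidates : List String) : List String :=
  let token_l := PySem.Str.lower token
  let preferences := pvPrefsA token_l
  let pref_rank : PySem.Dict String Int :=
    (PySem.List.enumerate preferences 0).foldl (fun d p => d.insert p.2 p.1) PySem.Dict.empty
  -- sort_key name = (pref_rank.get(name, 10_000), len(name), name): a tuple key,
  -- ported with PySem.List.sorted2 (rank first, then the (len, name) pair lexicographically)
  PySem.List.sorted2 candidates
    (fun name => (pref_rank.getD name 10000 : Int))
    (fun name => toLex (PySem.Str.len name, name)) false

-- ===== PORT B =====
-- the four base names the csv-family preferences are generated from (_BASES in Source B)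
def pvBases : List String :=
  ["hugging_table_list", "github_table_list", "html_table_list_mapped", "llm_table_list_mapped"]

-- _preferences in Source B: the csv branch builds its 13 names from pvBases
def pvPrefsB (t : String) : List String :=
  if t ∈ ["csvs", "csv", "table", "tables"] then
    (pvBases.map (fun b => PySem.Str.replace b "_mapped" "" ++ "_sym"))
      ++ pvBases
      ++ (pvBases.map (fun b => b ++ "_dedup"))
      ++ ["csv_path"]
  else if t ∈ ["readme", "readme_path", "readmepath"] then ["readme_path"]
  else if t ∈ ["model", "modelid", "model_id"] then ["modelId"]
  else []

def prioritize_candidates_py_alt (token : String) (candidates : List String) : List String :=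
  let prefs := pvPrefsB (PySem.Str.lower token)
  let prio := prefs.flatMap (fun p => candidates.filter (fun c => c == p))
  let rest := PySem.List.sorted2 (candidates.filter (fun c => !(prefs.contains c)))
    (fun n => PySem.Str.len n) (fun n => n) false
  prio ++ rest

-- ===== PRECONDITION & SPEC =====
def Spec_prioritize_candidates_py (token : String) (candidates : List String) (out : List String) : Prop := out = prioritize_candidates_py_alt token candidates
instance (token : String) (candidates : List String) (out : List String) : Decidable (Spec_prioritize_candidates_py token candidates out) := by unfold Spec_prioritize_candidates_py; infer_instance

-- ===== CLAIM (what is proved, stated in full; the proofs are below) =====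
def Claim_equal_prioritize_candidates_py : Prop := ∀ (token : String) (candidates : List String), Dom_prioritize_candidates_py token candidates → Spec_prioritize_candidates_py token candidates (prioritize_candidates_py token candidates)

-- ===== LEMMAS AND PROOFS =====

-- B's generated preference list is the same list A writes out literally
lemma pvPrefsB_eq (s : String) : pvPrefsB s = pvPrefsA s := by
  unfold pvPrefsB pvPrefsA
  split_ifs <;> rfl

-- the rank dictionary built by A, as a function of the preference list
def pvRank (prefs : List String) (n : String) : Int :=
  ((PySem.List.enumerate prefs 0).foldl (fun d p => d.insert p.2 p.1)
    (PySem.Dict.empty : PySem.Dict String Int)).getD n 10000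

lemma pvRank_items (prefs : List String) (hnd : prefs.Nodup) :
    ((PySem.List.enumerate prefs 0).foldl (fun d p => d.insert p.2 p.1)
      (PySem.Dict.empty : PySem.Dict String Int)).items
      = (PySem.List.enumerate prefs 0).map (fun a => (a.2, a.1)) := by
  have h := PySem.Dict.items_foldl_insert_fresh (l := PySem.List.enumerate prefs 0)
    (k := fun a => a.2) (v := fun a => a.1) (d := (PySem.Dict.empty : PySem.Dict String Int))
    (by intro a _; simp [PySem.Dict.contains_empty])
    (by rw [PySem.List.map_snd_enumerate]; exact hnd)
  simpa using h

lemma pvRank_keys (prefs : List String) (hnd : prefs.Nodup) :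
    ((PySem.List.enumerate prefs 0).foldl (fun d p => d.insert p.2 p.1)
      (PySem.Dict.empty : PySem.Dict String Int)).keys = prefs := by
  show (((PySem.List.enumerate prefs 0).foldl (fun d p => d.insert p.2 p.1)
      (PySem.Dict.empty : PySem.Dict String Int)).items.map (·.1)) = prefs
  rw [pvRank_items prefs hnd, List.map_map]
  exact PySem.List.map_snd_enumerate prefs 0

lemma pvRank_getElem (prefs : List String) (hnd : prefs.Nodup) (i : Nat) (hi : i < prefs.length) :
    pvRank prefs prefs[i] = (i : Int) := by
  unfold pvRank
  apply PySem.Dict.getD_of_mem_items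
  · rw [pvRank_items prefs hnd]
    exact List.mem_map.2 ⟨((i : Int), prefs[i]),
      (PySem.List.mem_enumerate_iff _ _ _).2 ⟨i, hi, by simp⟩, rfl⟩
  · rw [pvRank_keys prefs hnd]; exact hnd

lemma pvRank_not_mem (prefs : List String) (hnd : prefs.Nodup) (n : String) (hn : n ∉ prefs) :
    pvRank prefs n = 10000 := by
  unfold pvRank
  apply PySem.Dict.getD_of_not_contains
  rw [PySem.Dict.contains_eq_decide_mem_keys, pvRank_keys prefs hnd]
  simpa using hn

lemma pv_sorted2_eq_sorted {α κ₁ κ₂ : Type} [LinearOrder κ₁] [LinearOrder κ₂]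
    (xs : List α) (k1 : α → κ₁) (k2 : α → κ₂) :
    PySem.List.sorted2 xs k1 k2 false
      = PySem.List.sorted xs (fun x => toLex (k1 x, k2 x)) false := by
  have hbef : (fun a b => decide (k1 a < k1 b) || (!decide (k1 b < k1 a) && decide (k2 a < k2 b)))
      = (fun a b => decide (toLex (k1 a, k2 a) < toLex (k1 b, k2 b))) := by
    funext a b
    by_cases h1 : k1 a < k1 b <;> by_cases h2 : k1 b < k1 a
    · exact absurd h1 (lt_asymm h2)
    · simp [h1, h2, Prod.Lex.toLex_lt_toLex]
    · have hne : k1 a ≠ k1 b := fun h => lt_irrefl _ (h ▸ h2)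
      simp [h1, h2, Prod.Lex.toLex_lt_toLex, hne]
    · have heq : k1 a = k1 b := le_antisymm (not_lt.1 h2) (not_lt.1 h1)
      simp [Prod.Lex.toLex_lt_toLex, heq]
  show List.foldl (fun acc x => PySem.List.insertBy
      (fun a b => decide (k1 a < k1 b) || (!decide (k1 b < k1 a) && decide (k2 a < k2 b))) x acc) [] xs = _
  rw [hbef, PySem.List.sorted_eq_foldl_insertBy]

lemma pv_count_flatMap (candidates : List String) (a : String) :
    ∀ (prefs : List String), prefs.Nodup →
      (prefs.flatMap (fun p => candidates.filter (fun c => c == p))).count a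
        = if a ∈ prefs then candidates.count a else 0 := by
  intro prefs
  induction prefs with
  | nil => simp
  | cons p ps ih =>
    intro hnd
    rcases List.nodup_cons.1 hnd with ⟨hp, hps⟩
    simp only [List.flatMap_cons, List.count_append, ih hps]
    by_cases hap : a = p
    · subst hap
      rw [List.count_filter (by simp)]
      simp [hp]
    · have h0 : (candidates.filter (fun c => c == p)).count a = 0 := by
        rw [List.count_eq_zero]
        intro hmem
        exact hap (by simpa using (List.mem_filter.1 hmem).2)
      rw [h0]
      simp [List.mem_cons, hap]

lemma pv_main (prefs candidates : List String) (hnd : prefs.Nodup)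
    (hlen : prefs.length ≤ 9999) :
    PySem.List.sorted candidates
      (fun name => toLex ((pvRank prefs name : Int), toLex (PySem.Str.len name, name))) false
    = prefs.flatMap (fun p => candidates.filter (fun c => c == p))
      ++ PySem.List.sorted (candidates.filter (fun c => !(prefs.contains c)))
          (fun n => toLex (PySem.Str.len n, n)) false := by
  set k : String → Lex (Int × Lex (Int × String)) :=
    fun name => toLex ((pvRank prefs name : Int), toLex (PySem.Str.len name, name)) with hk
  set prio := prefs.flatMap (fun p => candidates.filter (fun c => c == p)) with hprio
  set rest := PySem.List.sorted (candidates.filter (fun c => !(prefs.contains c)))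
      (fun n => toLex (PySem.Str.len n, n)) false with hrest
  -- facts about pvRank of members / non-members
  have hmemRank : ∀ x ∈ prefs, ∃ i : Nat, i < prefs.length ∧ pvRank prefs x = (i : Int) := by
    intro x hx
    rcases List.mem_iff_getElem.1 hx with ⟨i, hi, rfl⟩
    exact ⟨i, hi, pvRank_getElem prefs hnd i hi⟩
  have hrestMem : ∀ x ∈ rest, x ∉ prefs := by
    intro x hx
    have := (PySem.List.mem_sorted _ _ _ _).1 hx
    have := List.mem_filter.1 this
    simpa using this.2
  -- injectivity of the composite key
  have hinj : Function.Injective k := by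
    intro a b h
    have := congrArg (fun x => (ofLex (ofLex x).2).2) h
    simpa [hk] using this
  -- permutation
  have hperm : (PySem.List.sorted candidates k false).Perm (prio ++ rest) := by
    refine (PySem.List.sorted_perm candidates k false).trans (List.perm_iff_count.2 ?_)
    intro a
    have hflat : prio.count a = if a ∈ prefs then candidates.count a else 0 :=
      pv_count_flatMap candidates a prefs hnd
    have hrestC : rest.count a
        = (candidates.filter (fun c => !(prefs.contains c))).count a :=
      ((PySem.List.sorted_perm _ _ _)).count_eq a
    have hfil : (candidates.filter (fun c => !(prefs.contains c))).count a
        = if a ∈ prefs then 0 else candidates.count a := by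
      by_cases ha : a ∈ prefs
      · rw [if_pos ha, List.count_eq_zero]
        intro hmem
        have := (List.mem_filter.1 hmem).2
        simp at this
        exact this ha
      · rw [if_neg ha, List.count_filter (by simpa using ha)]
    rw [List.count_append, hflat, hrestC, hfil]
    by_cases ha : a ∈ prefs <;> simp [ha]
  -- pairwise on the sorted side
  have hpw1 : List.Pairwise (fun a b => k a ≤ k b) (PySem.List.sorted candidates k false) :=
    PySem.List.sorted_pairwise candidates k
  -- pairwise on the partition side
  have hpw2 : List.Pairwise (fun a b => k a ≤ k b) (prio ++ rest) := by
    rw [List.pairwise_append]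
    refine ⟨?_, ?_, ?_⟩
    · -- priority prefix
      rw [hprio, List.pairwise_flatMap]
      constructor
      · intro p _
        apply List.pairwise_of_forall_mem_list
        intro a ha b hb
        have ha' : a = p := by simpa using (List.mem_filter.1 ha).2
        have hb' : b = p := by simpa using (List.mem_filter.1 hb).2
        rw [ha', hb']
      · rw [List.pairwise_iff_getElem]
        intro i j hi hj hij x hx y hy
        have hx' : x = prefs[i] := by simpa using (List.mem_filter.1 hx).2
        have hy' : y = prefs[j] := by simpa using (List.mem_filter.1 hy).2
        rw [hk]
        refine Prod.Lex.toLex_le_toLex.2 (Or.inl ?_)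
        show (pvRank prefs x : Int) < (pvRank prefs y : Int)
        rw [hx', hy', pvRank_getElem prefs hnd i hi, pvRank_getElem prefs hnd j hj]
        exact_mod_cast hij
    · -- sorted remainder, lifted to the composite key
      refine (PySem.List.sorted_pairwise _ _).imp_of_mem ?_
      intro a b ha hb hab
      rw [hk]
      refine Prod.Lex.toLex_le_toLex.2 (Or.inr ⟨?_, hab⟩)
      rw [pvRank_not_mem prefs hnd a (hrestMem a ha),
        pvRank_not_mem prefs hnd b (hrestMem b hb)]
    · -- every preferred candidate precedes every non-preferred one
      intro a ha b hb
      rcases List.mem_flatMap.1 ha with ⟨p, hp, hap⟩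
      have ha' : a = p := by simpa using (List.mem_filter.1 hap).2
      rcases hmemRank a (ha' ▸ hp) with ⟨i, hi, hri⟩
      rw [hk]
      refine Prod.Lex.toLex_le_toLex.2 (Or.inl ?_)
      rw [hri, pvRank_not_mem prefs hnd b (hrestMem b hb)]
      have : i ≤ 9999 := le_trans (Nat.le_of_lt hi) hlen
      omega
  exact PySem.List.eq_of_perm_of_pairwise_le_of_injective k hinj hperm hpw1 hpw2

lemma pvPrefsA_nodup (s : String) : (pvPrefsA s).Nodup := by
  unfold pvPrefsA; split_ifs <;> decide

lemma pvPrefsA_len (s : String) : (pvPrefsA s).length ≤ 9999 := by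
  unfold pvPrefsA; split_ifs <;> decide

-- ===== VERDICT (by name: the statement is the Claim_ definition above) =====
theorem prioritize_candidates_py_spec : Claim_equal_prioritize_candidates_py := by
  intro token candidates _
  show PySem.List.sorted2 candidates
      (fun name => (pvRank (pvPrefsA (PySem.Str.lower token)) name : Int))
      (fun name => toLex (PySem.Str.len name, name)) false
    = (pvPrefsB (PySem.Str.lower token)).flatMap (fun p => candidates.filter (fun c => c == p))
      ++ PySem.List.sorted2
          (candidates.filter (fun c => !((pvPrefsB (PySem.Str.lower token)).contains c)))
          (fun n => PySem.Str.len n) (fun n => n) false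
  rw [pvPrefsB_eq, pv_sorted2_eq_sorted, pv_sorted2_eq_sorted]
  exact pv_main _ candidates (pvPrefsA_nodup _) (pvPrefsA_len _)
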